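-- pv_equiv track=rewrite | github.com/pecalleja/PythonLocalDevelopment | src/codesignal/heap/sort_by_median.py | solution
-- ===== SOURCE A (Python) =====
-- import heapq
--
-- def solution(arr):
--     n = len(arr)
--     if n == 0:
--         return []
--
--     # 1. Find the median via sorting (O(n log n))
--     sorted_arr = sorted(arr)
--     if n % 2 == 0:  # even
--         median = sorted_arr[(n // 2) - 1]
--     else:  # odd
--         median = sorted_arr[n // 2]
--
--     # 2. Push into a min-heap with the appropriate tie-break
--     min_heap = []
--     for x in arr:
--         diff = abs(x - median)
--
--         if n % 2 == 0:
--             # even n => place ">= median" first when diff is tied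
--             side_flag = 0 if x >= median else 1
--         else:
--             # odd n => place smaller first when diff is tied
--             side_flag = 0 if x < median else 1
--
--         # The heap sorts primarily by (diff, side_flag, x)
--         heapq.heappush(min_heap, (diff, side_flag, x))
--
--     # 3. Pop from the heap
--     result = []
--     while min_heap:
--         _, _, val = heapq.heappop(min_heap)
--         result.append(val)
--
--     return result
-- ===== SOURCE B (Python) =====
-- def solution(arr):
--     n = len(arr)
--     if n == 0:
--         return []
--     sorted_arr = sorted(arr)
--     median = sorted_arr[(n // 2) - 1] if n % 2 == 0 else sorted_arr[n // 2]
--     # sorted_arr is already ordered by value; a second stable sort keyed by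
--     # (distance from median, side flag) leaves ties ordered by value, which is
--     # exactly the heap's (diff, side_flag, x) order.
--     if n % 2 == 0:
--         return sorted(sorted_arr, key=lambda x: (abs(x - median), 0 if x >= median else 1))
--     return sorted(sorted_arr, key=lambda x: (abs(x - median), 0 if x < median else 1))
-- ===== Notes on version B (the rewrite author's own statement) =====
-- stated objective: faster
-- what changed: Replaces the per-element heappush loop and the while-heappop loop with stable sorts: re-sorting the already value-sorted list by (abs(x-median), side_flag), with stability supplying the value tie-break.
import Mathlib
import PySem

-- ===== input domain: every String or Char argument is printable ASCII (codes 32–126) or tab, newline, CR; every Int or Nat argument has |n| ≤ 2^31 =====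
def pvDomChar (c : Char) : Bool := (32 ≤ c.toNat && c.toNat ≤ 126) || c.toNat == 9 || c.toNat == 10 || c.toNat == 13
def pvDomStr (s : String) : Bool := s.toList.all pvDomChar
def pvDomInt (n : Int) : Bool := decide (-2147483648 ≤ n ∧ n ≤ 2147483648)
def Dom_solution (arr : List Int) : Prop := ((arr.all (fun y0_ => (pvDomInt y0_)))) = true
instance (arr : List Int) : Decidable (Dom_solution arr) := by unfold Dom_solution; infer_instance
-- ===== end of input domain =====

-- B replaces A's heappush loop + while-heappop loop with two stable sorts: the value-sorted
-- list re-sorted by (abs(x-median), side_flag); stability supplies the heap's value tie-break.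


-- ===== PORT A =====
-- Python's lexicographic '<' on the heap's (diff, side_flag, x) triples.
def pvTripLt (a b : Int × Int × Int) : Bool :=
  a.1 < b.1 || (a.1 == b.1 && (a.2.1 < b.2.1 || (a.2.1 == b.2.1 && a.2.2 < b.2.2)))

-- heappop returns a minimal tuple of the pool (equal tuples are identical triples,
-- so the heap is observably a multiset with extract-min); pvFindMin is that minimum.
def pvFindMin (x : Int × Int × Int) (t : List (Int × Int × Int)) : Int × Int × Int :=
  t.foldl (fun a b => if pvTripLt b a then b else a) x

theorem pvFindMin_mem (x : Int × Int × Int) (t : List (Int × Int × Int)) :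
    pvFindMin x t ∈ x :: t := by
  induction t generalizing x with
  | nil => simp [pvFindMin]
  | cons b t ih =>
    simp only [pvFindMin, List.foldl_cons]
    by_cases hc : pvTripLt b x = true
    · simp only [if_pos hc]
      have h := ih b
      simp only [pvFindMin] at h
      rcases List.mem_cons.1 h with h | h <;> simp [h]
    · simp only [if_neg hc]
      have h := ih x
      simp only [pvFindMin] at h
      rcases List.mem_cons.1 h with h | h <;> simp [h]

-- the 'while min_heap: heappop' loop of A
def pvPopAll : List (Int × Int × Int) → List Int
  | [] => []
  | x :: t =>
    let m := pvFindMin x t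
    m.2.2 :: pvPopAll ((x :: t).erase m)
  termination_by h => h.length
  decreasing_by
    simp [List.length_erase_of_mem (pvFindMin_mem x t)]

def solution (arr : List Int) : List Int :=
  let n := arr.length
  if n = 0 then []
  else
    let sorted_arr := PySem.List.sorted arr (fun x => x) false
    let median :=
      if n % 2 = 0 then PySem.List.pyGetD sorted_arr (PySem.Int.floordiv (n : Int) 2 - 1) 0
      else PySem.List.pyGetD sorted_arr (PySem.Int.floordiv (n : Int) 2) 0
    let min_heap := arr.map (fun x =>
      let diff := |x - median|
      let side_flag : Int :=
        if n % 2 = 0 then (if x ≥ median then 0 else 1)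
        else (if x < median then 0 else 1)
      (diff, side_flag, x))
    pvPopAll min_heap

-- ===== PORT B =====
def solution_alt (arr : List Int) : List Int :=
  let n := arr.length
  if n = 0 then []
  else
    let sorted_arr := PySem.List.sorted arr (fun x => x) false
    let median :=
      if n % 2 = 0 then PySem.List.pyGetD sorted_arr (PySem.Int.floordiv (n : Int) 2 - 1) 0
      else PySem.List.pyGetD sorted_arr (PySem.Int.floordiv (n : Int) 2) 0
    if n % 2 = 0 then
      PySem.List.sorted2 sorted_arr (fun x => |x - median|)
        (fun x => if x ≥ median then (0 : Int) else 1) false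
    else
      PySem.List.sorted2 sorted_arr (fun x => |x - median|)
        (fun x => if x < median then (0 : Int) else 1) false

-- ===== PRECONDITION & SPEC =====
def Spec_solution (arr : List Int) (out : List Int) : Prop := out = solution_alt arr
instance (arr : List Int) (out : List Int) : Decidable (Spec_solution arr out) := by unfold Spec_solution; infer_instance

-- ===== CLAIM (what is proved, stated in full; the proofs are below) =====
def Claim_equal_solution : Prop := ∀ (arr : List Int), Dom_solution arr → Spec_solution arr (solution arr)

-- ===== LEMMAS AND PROOFS =====
-- the total preorder "a comes no later than b" for keys (d, s, identity)
def pvLe (d s : Int → Int) (a b : Int) : Prop :=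
  pvTripLt (d b, s b, b) (d a, s a, a) = false

theorem pvTripLt_iff (a b : Int × Int × Int) :
    pvTripLt a b = true ↔
      a.1 < b.1 ∨ (a.1 = b.1 ∧ (a.2.1 < b.2.1 ∨ (a.2.1 = b.2.1 ∧ a.2.2 < b.2.2))) := by
  simp [pvTripLt]

theorem pvTripLt_not_of_not_of_not {a b c : Int × Int × Int}
    (h1 : pvTripLt b a = false) (h2 : pvTripLt c b = false) : pvTripLt c a = false := by
  rw [Bool.eq_false_iff, Ne, pvTripLt_iff] at h1 h2 ⊢; omega

theorem pvTripLt_irrefl (a : Int × Int × Int) : pvTripLt a a = false := by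
  rw [Bool.eq_false_iff, Ne, pvTripLt_iff]; omega

theorem pvTripLt_asymm {a b : Int × Int × Int} (h : pvTripLt a b = true) :
    pvTripLt b a = false := by
  rw [pvTripLt_iff] at h
  rw [Bool.eq_false_iff, Ne, pvTripLt_iff]; omega

theorem pvFindMin_min (x : Int × Int × Int) (t : List (Int × Int × Int)) :
    ∀ y ∈ x :: t, pvTripLt y (pvFindMin x t) = false := by
  induction t generalizing x with
  | nil =>
    intro y hy; simp at hy; subst hy
    simp only [pvFindMin, List.foldl_nil]
    exact pvTripLt_irrefl y
  | cons b t ih =>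
    intro y hy
    have hz : pvFindMin x (b :: t) = pvFindMin (if pvTripLt b x then b else x) t := by
      simp [pvFindMin]
    have hFz : pvTripLt (if pvTripLt b x then b else x)
        (pvFindMin (if pvTripLt b x then b else x) t) = false :=
      ih _ _ List.mem_cons_self
    have hzx : pvTripLt x (if pvTripLt b x then b else x) = false := by
      by_cases hc : pvTripLt b x = true
      · rw [if_pos hc]; exact pvTripLt_asymm hc
      · rw [if_neg hc]; exact pvTripLt_irrefl x
    have hzb : pvTripLt b (if pvTripLt b x then b else x) = false := by
      by_cases hc : pvTripLt b x = true
      · rw [if_pos hc]; exact pvTripLt_irrefl b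
      · rw [if_neg hc]; exact Bool.eq_false_iff.2 hc
    rw [hz]
    rcases List.mem_cons.1 hy with h | h
    · rw [h]; exact pvTripLt_not_of_not_of_not hFz hzx
    rcases List.mem_cons.1 h with h2 | h2
    · rw [h2]; exact pvTripLt_not_of_not_of_not hFz hzb
    · exact ih _ _ (List.mem_cons_of_mem _ h2)

theorem pvPopAll_perm (h : List (Int × Int × Int)) :
    (pvPopAll h).Perm (h.map (fun t => t.2.2)) := by
  induction h using pvPopAll.induct with
  | case1 => simp [pvPopAll]
  | case2 x t m ih =>
    rw [pvPopAll]
    have hp : (x :: t).Perm (pvFindMin x t :: (x :: t).erase (pvFindMin x t)) :=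
      List.perm_cons_erase (pvFindMin_mem x t)
    refine (ih.cons (pvFindMin x t).2.2).trans ?_
    simpa using (hp.map (fun t => t.2.2)).symm

theorem pvPopAll_pairwise (d s : Int → Int) (h : List (Int × Int × Int))
    (hk : ∀ t ∈ h, t = (d t.2.2, s t.2.2, t.2.2)) :
    (pvPopAll h).Pairwise (pvLe d s) := by
  induction h using pvPopAll.induct with
  | case1 => simp [pvPopAll]
  | case2 x t m ih =>
    rw [pvPopAll]
    have hsub : (x :: t).erase (pvFindMin x t) ⊆ x :: t := List.erase_subset
    refine List.Pairwise.cons ?_ (ih (fun t' ht' => hk t' (hsub ht')))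
    intro b hb
    have hb' : b ∈ ((x :: t).erase (pvFindMin x t)).map (fun t => t.2.2) :=
      (pvPopAll_perm _).mem_iff.1 hb
    rcases List.mem_map.1 hb' with ⟨t', ht', rfl⟩
    have h1 : pvTripLt t' (pvFindMin x t) = false := pvFindMin_min x t t' (hsub ht')
    have e1 := hk _ (pvFindMin_mem x t)
    have e2 := hk t' (hsub ht')
    unfold pvLe
    rw [← e1, ← e2]
    exact h1

-- ---- B side: insertion sort by the pair key (d, s) on a value-sorted input ----
theorem pvLe_trans {d s : Int → Int} {a b c : Int}
    (h1 : pvLe d s a b) (h2 : pvLe d s b c) : pvLe d s a c :=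
  pvTripLt_not_of_not_of_not h1 h2

theorem pvBefore_true_le {d s : Int → Int} {a b : Int}
    (h : (decide (d a < d b) || (!decide (d b < d a) && decide (s a < s b))) = true) :
    pvLe d s a b := by
  unfold pvLe
  rw [Bool.eq_false_iff, Ne, pvTripLt_iff]
  simp at h; dsimp only; omega

theorem pvBefore_false_le {d s : Int → Int} {a b : Int}
    (h : (decide (d b < d a) || (!decide (d a < d b) && decide (s b < s a))) = false)
    (hv : a ≤ b) : pvLe d s a b := by
  unfold pvLe
  rw [Bool.eq_false_iff, Ne, pvTripLt_iff]
  simp at h; dsimp only; omega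

theorem pvInsertBy_pairwise (d s : Int → Int) (x : Int) (acc : List Int)
    (hp : acc.Pairwise (pvLe d s)) (hub : ∀ y ∈ acc, y ≤ x) :
    (PySem.List.insertBy
        (fun a b => decide (d a < d b) || (!decide (d b < d a) && decide (s a < s b)))
        x acc).Pairwise (pvLe d s) := by
  induction acc with
  | nil =>
    rw [PySem.List.insertBy]
    exact List.pairwise_singleton _ _
  | cons y ys ih =>
    rw [PySem.List.insertBy]
    rcases List.pairwise_cons.1 hp with ⟨hy, hys⟩
    by_cases hc : (decide (d x < d y) || (!decide (d y < d x) && decide (s x < s y))) = true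
    · rw [if_pos hc]
      refine List.Pairwise.cons ?_ hp
      intro b hb
      rcases List.mem_cons.1 hb with rfl | hb
      · exact pvBefore_true_le hc
      · exact pvLe_trans (pvBefore_true_le hc) (hy b hb)
    · rw [if_neg hc]
      refine List.Pairwise.cons ?_ (ih hys (fun y hy' => hub y (List.mem_cons_of_mem _ hy')))
      intro b hb
      rcases (PySem.List.mem_insertBy _ _ _ _).1 hb with rfl | hb
      · exact pvBefore_false_le (Bool.eq_false_iff.2 (fun h => hc h))
          (hub y (List.mem_cons_self))
      · exact hy b hb

theorem pvFoldlIns_pairwise (d s : Int → Int) :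
    ∀ (xs acc : List Int), acc.Pairwise (pvLe d s) →
      (∀ y ∈ acc, ∀ z ∈ xs, y ≤ z) → xs.Pairwise (· ≤ ·) →
      (xs.foldl (fun acc x =>
          PySem.List.insertBy
            (fun a b => decide (d a < d b) || (!decide (d b < d a) && decide (s a < s b)))
            x acc) acc).Pairwise (pvLe d s) := by
  intro xs
  induction xs with
  | nil => intro acc hp _ _; simpa using hp
  | cons x t ih =>
    intro acc hp hub hs
    rcases List.pairwise_cons.1 hs with ⟨hx, ht⟩
    rw [List.foldl_cons]
    refine ih _ (pvInsertBy_pairwise d s x acc hp (fun y hy => hub y hy x List.mem_cons_self)) ?_ ht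
    intro y hy z hz
    rcases (PySem.List.mem_insertBy _ _ _ _).1 hy with rfl | hy
    · exact hx z hz
    · exact hub y hy z (List.mem_cons_of_mem _ hz)

theorem pvLe_antisymm {d s : Int → Int} {a b : Int}
    (h1 : pvLe d s a b) (h2 : pvLe d s b a) : a = b := by
  unfold pvLe at h1 h2
  rw [Bool.eq_false_iff, Ne, pvTripLt_iff] at h1 h2
  dsimp only at h1 h2; omega

-- the heart: A's extract-min loop over the (d, s, x) triples of arr equals B's
-- stable pair-keyed insertion sort of the value-sorted arr
theorem pvMain (arr : List Int) (d s : Int → Int) :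
    pvPopAll (arr.map (fun x => (d x, s x, x))) =
      PySem.List.sorted2 (PySem.List.sorted arr (fun x => x) false) d s false := by
  have hA_perm : (pvPopAll (arr.map (fun x => (d x, s x, x)))).Perm arr := by
    refine (pvPopAll_perm _).trans ?_
    rw [List.map_map]
    simp only [Function.comp_def]
    rw [List.map_id' arr]
  have hB_perm : (PySem.List.sorted2 (PySem.List.sorted arr (fun x => x) false) d s false).Perm arr :=
    (PySem.List.sorted2_perm _ d s false).trans (PySem.List.sorted_perm arr _ false)
  have hA_pw : (pvPopAll (arr.map (fun x => (d x, s x, x)))).Pairwise (pvLe d s) := by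
    refine pvPopAll_pairwise d s _ ?_
    intro t ht
    rcases List.mem_map.1 ht with ⟨x, _, rfl⟩
    rfl
  have hB_pw : (PySem.List.sorted2 (PySem.List.sorted arr (fun x => x) false) d s false).Pairwise
      (pvLe d s) := by
    show (List.foldl _ [] _).Pairwise (pvLe d s)
    refine pvFoldlIns_pairwise d s _ [] (List.Pairwise.nil) (by simp) ?_
    simpa using PySem.List.sorted_pairwise arr (fun x => x)
  exact List.Perm.eq_of_pairwise
    (fun a b _ _ h1 h2 => pvLe_antisymm h1 h2) hA_pw hB_pw
    (hA_perm.trans hB_perm.symm)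

-- ===== VERDICT (by name: the statement is the Claim_ definition above) =====
theorem solution_spec : Claim_equal_solution := by
  intro arr _
  unfold Spec_solution solution solution_alt
  by_cases h0 : arr.length = 0
  · simp [h0]
  simp only [if_neg h0]
  by_cases hm : arr.length % 2 = 0 <;> simp only [hm, reduceIte]
  · exact pvMain arr
      (fun x => |x - PySem.List.pyGetD (PySem.List.sorted arr (fun x => x) false)
        (PySem.Int.floordiv (arr.length : Int) 2 - 1) 0|)
      (fun x => if x ≥ PySem.List.pyGetD (PySem.List.sorted arr (fun x => x) false)
        (PySem.Int.floordiv (arr.length : Int) 2 - 1) 0 then 0 else 1)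
  · exact pvMain arr
      (fun x => |x - PySem.List.pyGetD (PySem.List.sorted arr (fun x => x) false)
        (PySem.Int.floordiv (arr.length : Int) 2) 0|)
      (fun x => if x < PySem.List.pyGetD (PySem.List.sorted arr (fun x => x) false)
        (PySem.Int.floordiv (arr.length : Int) 2) 0 then 0 else 1)
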